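-- pv_equiv track=rewrite | github.com/Kim-Young-Hoo/boj_algorithms | 백준/Gold/1092. 배/배.py | solution
-- ===== SOURCE A (Python) =====
-- def solution(cranes, boxes):
--     cnt = 0
--     mask = [False] * len(boxes)
--     crane_idx = [0] * len(cranes)
--
--
--     if cranes[0] < boxes[0]:
--         return -1
--
--     while sum(mask) != len(mask):
--         for i in range(len(cranes)):
--             while crane_idx[i] < len(boxes):
--                 if cranes[i] >= boxes[crane_idx[i]] and not mask[crane_idx[i]]:
--                     mask[crane_idx[i]] = True
--                     break
--                 else:
--                     crane_idx[i] += 1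
--         cnt += 1
--
--     return cnt
-- ===== SOURCE B (Python) =====
-- def solution(cranes, boxes):
--     if cranes[0] < boxes[0]:
--         return -1
--     remaining = list(boxes)
--     cnt = 0
--     while remaining:
--         for c in cranes:
--             for i, b in enumerate(remaining):
--                 if c >= b:
--                     del remaining[i]
--                     break
--         cnt += 1
--     return cnt
-- ===== Notes on version B (the rewrite author's own statement) =====
-- stated objective: simpler
-- what changed: Replaced A's boolean mask plus persistent per-crane scan indices with a single shrinking ordered list that each crane scans fresh from the front every round.
import Mathlib
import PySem

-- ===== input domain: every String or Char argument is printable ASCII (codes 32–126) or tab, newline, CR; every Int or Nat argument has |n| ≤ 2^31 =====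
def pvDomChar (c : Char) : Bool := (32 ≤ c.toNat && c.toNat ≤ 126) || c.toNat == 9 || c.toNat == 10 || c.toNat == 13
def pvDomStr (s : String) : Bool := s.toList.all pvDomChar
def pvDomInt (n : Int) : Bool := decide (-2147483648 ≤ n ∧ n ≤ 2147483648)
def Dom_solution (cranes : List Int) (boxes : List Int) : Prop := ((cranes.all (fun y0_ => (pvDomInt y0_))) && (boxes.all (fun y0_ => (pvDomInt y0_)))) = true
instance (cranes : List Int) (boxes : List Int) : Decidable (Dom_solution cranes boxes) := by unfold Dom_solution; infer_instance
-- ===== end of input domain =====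

-- B replaces A's boolean mask + persistent per-crane scan indices with a single
-- shrinking ordered list scanned fresh from the front each round (objective: simpler).

-- ===== PORT A =====
-- inner `while crane_idx[i] < len(boxes)` loop of A: advance k until a liftable
-- unmasked box is found (mask it, keep k there) or k reaches len(boxes)
def innerA (c : Int) (boxes : List Int) (mask : List Bool) (k : Nat) : List Bool × Nat :=
  if _h : k < boxes.length then
    if c ≥ boxes.getD k 0 ∧ mask.getD k false = false then (mask.set k true, k)
    else innerA c boxes mask (k + 1)
  else (mask, k)
termination_by boxes.length - k
decreasing_by omega

-- the `for i in range(len(cranes))` body: each crane (with its saved index) runs innerA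
def roundA (boxes : List Int) (mask : List Bool) : List (Int × Nat) → List Bool × List (Int × Nat)
  | [] => (mask, [])
  | (c, k) :: rest =>
    let p := innerA c boxes mask k
    let q := roundA boxes p.1 rest
    (q.1, (c, p.2) :: q.2)

-- the `while sum(mask) != len(mask)` loop; fuel = len(boxes) suffices whenever the
-- Python terminates (each round masks at least one box)
def outerA (boxes : List Int) : Nat → List (Int × Nat) → List Bool → Int → Int
  | 0, _, _, cnt => cnt
  | fuel + 1, cs, mask, cnt =>
    if mask.count true = mask.length then cnt
    else
      let p := roundA boxes mask cs
      outerA boxes fuel p.2 p.1 (cnt + 1)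

def solution (cranes : List Int) (boxes : List Int) : Int :=
  match PySem.List.pyGet? cranes 0, PySem.List.pyGet? boxes 0 with
  | some c0, some b0 =>
    if c0 < b0 then -1
    else outerA boxes boxes.length (cranes.map (fun c => (c, 0))) (List.replicate boxes.length false) 0
  | _, _ => -1  -- cranes[0]/boxes[0] raises IndexError in Python; excluded by Pre_

-- ===== PORT B =====
-- `for i, b in enumerate(remaining): if c >= b: del remaining[i]; break`
def removeFirst (c : Int) : List Int → List Int
  | [] => []
  | b :: rest => if c ≥ b then rest else b :: removeFirst c rest

def roundB (cranes : List Int) (remaining : List Int) : List Int :=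
  cranes.foldl (fun r c => removeFirst c r) remaining

def outerB (cranes : List Int) : Nat → List Int → Int → Int
  | 0, _, cnt => cnt
  | fuel + 1, remaining, cnt =>
    if remaining = [] then cnt
    else outerB cranes fuel (roundB cranes remaining) (cnt + 1)

def solution_alt (cranes : List Int) (boxes : List Int) : Int :=
  match PySem.List.pyGet? cranes 0 with
  | none => -1  -- cranes[0] raises IndexError in Python; excluded by Pre_
  | some c0 =>
    match PySem.List.pyGet? boxes 0 with
    | none => -1
    | some b0 =>
      if c0 < b0 then -1
      else outerB cranes boxes.length boxes 0

-- ===== PRECONDITION & SPEC =====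
-- Pre_ excludes the empty-list inputs (Python IndexError on cranes[0]/boxes[0]) and the
-- inputs where the guard passes yet some box exceeds every crane, on which A loops forever.
def Pre_solution (cranes : List Int) (boxes : List Int) : Prop :=
  cranes ≠ [] ∧ boxes ≠ [] ∧
    (boxes.getD 0 0 ≤ cranes.getD 0 0 → ∀ b ∈ boxes, ∃ c ∈ cranes, b ≤ c)
instance (cranes : List Int) (boxes : List Int) : Decidable (Pre_solution cranes boxes) := by
  unfold Pre_solution; infer_instance

def pvWitness_solution : List Int × List Int := ([5, 2], [3, 1, 2])

def Spec_solution (cranes : List Int) (boxes : List Int) (out : Int) : Prop := out = solution_alt cranes boxes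
instance (cranes : List Int) (boxes : List Int) (out : Int) : Decidable (Spec_solution cranes boxes out) := by unfold Spec_solution; infer_instance

-- ===== CLAIM (what is proved, stated in full; the proofs are below) =====
def Claim_equal_solution : Prop := ∀ (cranes : List Int) (boxes : List Int), Dom_solution cranes boxes → Pre_solution cranes boxes → Spec_solution cranes boxes (solution cranes boxes)

-- ===== LEMMAS AND PROOFS =====

-- the boxes still to unload: unmasked entries of boxes, in order
def sel : List Bool → List Int → List Int
  | m :: ms, b :: bs => if m then sel ms bs else b :: sel ms bs
  | _, _ => []

-- structural description of one innerA pass from index 0: mask the first unmasked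
-- liftable box; returns (new mask, index found or length)
def pairF (c : Int) : List Bool → List Int → List Bool × Nat
  | m :: ms, b :: bs =>
    if c ≥ b ∧ m = false then (true :: ms, 0)
    else
      let p := pairF c ms bs
      (m :: p.1, p.2 + 1)
  | ms, _ => (ms, 0)

-- crane c will never pick a box at an index < k
def CraneInv (c : Int) (boxes : List Int) (mask : List Bool) (k : Nat) : Prop :=
  ∀ j, j < k → (mask.getD j false = true ∨ c < boxes.getD j 0)

theorem pairF_length (c : Int) (mask : List Bool) (boxes : List Int) :
    (pairF c mask boxes).1.length = mask.length := by
  induction mask generalizing boxes with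
  | nil => cases boxes <;> simp [pairF]
  | cons m ms ih =>
    cases boxes with
    | nil => simp [pairF]
    | cons b bs =>
      by_cases h : c ≥ b ∧ m = false <;> simp [pairF, h, ih]

theorem pairF_mono (c : Int) (mask : List Bool) (boxes : List Int) (j : Nat)
    (h : mask.getD j false = true) : (pairF c mask boxes).1.getD j false = true := by
  induction mask generalizing boxes j with
  | nil => cases boxes <;> simp_all
  | cons m ms ih =>
    cases boxes with
    | nil => simpa [pairF] using h
    | cons b bs =>
      by_cases hc : c ≥ b ∧ m = false
      · cases j with
        | zero => simp_all
        | succ j => simpa [pairF, hc] using h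
      · cases j with
        | zero => simpa [pairF, hc] using h
        | succ j => simpa [pairF, hc] using ih bs j (by simpa using h)

theorem pairF_inv (c : Int) (mask : List Bool) (boxes : List Int) :
    CraneInv c boxes (pairF c mask boxes).1 (pairF c mask boxes).2 := by
  induction mask generalizing boxes with
  | nil => cases boxes <;> simp [pairF, CraneInv]
  | cons m ms ih =>
    cases boxes with
    | nil => simp [pairF, CraneInv]
    | cons b bs =>
      by_cases hc : c ≥ b ∧ m = false
      · simp [pairF, hc, CraneInv]
      · intro j hj
        simp only [pairF, if_neg hc] at hj ⊢
        cases j with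
        | zero =>
          rcases Decidable.em (m = true) with hm | hm
          · left; simpa using hm
          · right
            have : ¬ c ≥ b := by
              intro hcb; exact hc ⟨hcb, by simpa using hm⟩
            simpa using (lt_of_not_ge this : b > c)
        | succ j =>
          have := ih bs j (by omega)
          rcases this with h | h
          · left; simpa using h
          · right; simpa using h

theorem pairF_le_length (c : Int) (mask : List Bool) (boxes : List Int)
    (hl : mask.length = boxes.length) : (pairF c mask boxes).2 ≤ boxes.length := by
  induction mask generalizing boxes with
  | nil => cases boxes <;> simp_all [pairF]
  | cons m ms ih =>
    cases boxes with
    | nil => simp_all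
    | cons b bs =>
      by_cases hc : c ≥ b ∧ m = false
      · simp [pairF, hc]
      · have := ih bs (by simpa using hl)
        simp [pairF, hc]; omega

-- innerA from index k equals the structural scan on the dropped suffix
theorem innerA_eq_drop (c : Int) (boxes : List Int) :
    ∀ n k mask, boxes.length - k ≤ n → mask.length = boxes.length →
    innerA c boxes mask k =
      (mask.take k ++ (pairF c (mask.drop k) (boxes.drop k)).1,
       k + (pairF c (mask.drop k) (boxes.drop k)).2) := by
  intro n
  induction n with
  | zero =>
    intro k mask hn hl
    have h : ¬ k < boxes.length := by omega
    rw [innerA, dif_neg h]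
    rw [List.drop_eq_nil_of_le (by omega : boxes.length ≤ k),
        List.drop_eq_nil_of_le (by omega : mask.length ≤ k)]
    simp [pairF, List.take_of_length_le (by omega : mask.length ≤ k)]
  | succ n ih =>
    intro k mask hn hl
    by_cases h : k < boxes.length
    · have hk : k < mask.length := by omega
      have hmd : mask.drop k = mask[k] :: mask.drop (k + 1) := List.drop_eq_getElem_cons hk
      have hbd : boxes.drop k = boxes[k] :: boxes.drop (k + 1) := List.drop_eq_getElem_cons h
      have hmg : mask.getD k false = mask[k] := by
        simp [List.getD_eq_getElem?_getD, List.getElem?_eq_getElem hk]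
      have hbg : boxes.getD k 0 = boxes[k] := by
        simp [List.getD_eq_getElem?_getD, List.getElem?_eq_getElem h]
      have htake : mask.take (k + 1) = mask.take k ++ [mask[k]] := by
        rw [List.take_add_one, List.getElem?_eq_getElem hk]; rfl
      rw [innerA, dif_pos h]
      by_cases hcond : c ≥ boxes.getD k 0 ∧ mask.getD k false = false
      · rw [if_pos hcond, hmd, hbd]
        have hc' : c ≥ boxes[k] ∧ mask[k] = false := by rw [← hbg, ← hmg]; exact hcond
        rw [pairF, if_pos hc']
        simp only [Prod.mk.injEq]; refine ⟨?_, ?_⟩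
        · rw [List.set_eq_take_append_cons_drop, if_pos hk]
        · rfl
      · rw [if_neg hcond]
        have hc' : ¬ (c ≥ boxes[k] ∧ mask[k] = false) := by rw [← hbg, ← hmg]; exact hcond
        rw [ih (k + 1) mask (by omega) hl, hmd, hbd, pairF, if_neg hc']
        simp only [Prod.mk.injEq]; refine ⟨?_, ?_⟩
        · rw [htake, List.append_assoc]; rfl
        · omega
    · rw [innerA, dif_neg h]
      rw [List.drop_eq_nil_of_le (by omega : boxes.length ≤ k),
          List.drop_eq_nil_of_le (by omega : mask.length ≤ k)]
      simp [pairF, List.take_of_length_le (by omega : mask.length ≤ k)]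

theorem craneInv_mono (c : Int) (boxes : List Int) (mask mask' : List Bool) (k : Nat)
    (hm : ∀ j, mask.getD j false = true → mask'.getD j false = true)
    (hi : CraneInv c boxes mask k) : CraneInv c boxes mask' k := by
  intro j hj
  rcases hi j hj with h | h
  · exact Or.inl (hm j h)
  · exact Or.inr h

-- skipping a "good" prefix does not change the structural scan
theorem pairF_good_prefix (c : Int) :
    ∀ k (mask : List Bool) (boxes : List Int), mask.length = boxes.length →
    k ≤ boxes.length → CraneInv c boxes mask k →
    pairF c mask boxes =
      (mask.take k ++ (pairF c (mask.drop k) (boxes.drop k)).1,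
       k + (pairF c (mask.drop k) (boxes.drop k)).2) := by
  intro k
  induction k with
  | zero => intro mask boxes _ _ _; simp
  | succ k ih =>
    intro mask boxes hl hk hi
    cases boxes with
    | nil => simp at hk
    | cons b bs =>
      cases mask with
      | nil => simp at hl
      | cons m ms =>
        have h0 := hi 0 (by omega)
        simp only [List.getD_cons_zero] at h0
        have hcond : ¬ (c ≥ b ∧ m = false) := by
          rcases h0 with h | h
          · intro hc; rw [hc.2] at h; cases h
          · intro hc; omega
        have hi' : CraneInv c bs ms k := by
          intro j hj
          have := hi (j + 1) (by omega)
          simpa using this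
        rw [pairF, if_neg hcond, ih ms bs (by simpa using hl) (by simpa using hk) hi']
        simp only [List.take_succ_cons, List.drop_succ_cons, Prod.mk.injEq]
        exact ⟨rfl, by omega⟩

-- innerA under the crane invariant is exactly the structural scan from index 0
theorem innerA_eq (c : Int) (boxes : List Int) (mask : List Bool) (k : Nat)
    (hl : mask.length = boxes.length) (hk : k ≤ boxes.length)
    (hi : CraneInv c boxes mask k) :
    innerA c boxes mask k = pairF c mask boxes := by
  rw [innerA_eq_drop c boxes boxes.length k mask (by omega) hl,
      pairF_good_prefix c k mask boxes hl hk hi]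

theorem sel_pairF (c : Int) :
    ∀ (mask : List Bool) (boxes : List Int), mask.length = boxes.length →
    sel (pairF c mask boxes).1 boxes = removeFirst c (sel mask boxes) := by
  intro mask
  induction mask with
  | nil => intro boxes hl; cases boxes with
    | nil => simp [sel, pairF, removeFirst]
    | cons b bs => simp at hl
  | cons m ms ih =>
    intro boxes hl
    cases boxes with
    | nil => simp at hl
    | cons b bs =>
      by_cases hc : c ≥ b ∧ m = false
      · rw [pairF, if_pos hc]
        simp [sel, hc.2, removeFirst, hc.1]
      · rw [pairF, if_neg hc]
        cases hm : m with
        | true => simp only [sel, if_true]; exact ih bs (by simpa using hl)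
        | false =>
          have hcb : ¬ c ≥ b := by intro h; exact hc ⟨h, hm⟩
          simp [sel, removeFirst, hcb]
          exact ih bs (by simpa using hl)

theorem sel_nil_iff :
    ∀ (mask : List Bool) (boxes : List Int), mask.length = boxes.length →
    (sel mask boxes = [] ↔ mask.count true = mask.length) := by
  intro mask
  induction mask with
  | nil => intro boxes hl; cases boxes <;> simp_all [sel]
  | cons m ms ih =>
    intro boxes hl
    cases boxes with
    | nil => simp at hl
    | cons b bs =>
      cases m with
      | true =>
        simp only [sel, if_true, List.count_cons, List.length_cons]
        rw [ih bs (by simpa using hl)]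
        simp
      | false =>
        simp only [sel, List.count_cons, List.length_cons]
        constructor
        · intro h; cases h
        · intro h
          have : ms.count true ≤ ms.length := List.count_le_length
          simp at h; omega

theorem roundA_spec (boxes : List Int) :
    ∀ (cs : List (Int × Nat)) (mask : List Bool), mask.length = boxes.length →
    (∀ p ∈ cs, CraneInv p.1 boxes mask p.2 ∧ p.2 ≤ boxes.length) →
    (roundA boxes mask cs).1.length = boxes.length ∧
    sel (roundA boxes mask cs).1 boxes
      = (cs.map Prod.fst).foldl (fun r c => removeFirst c r) (sel mask boxes) ∧
    (∀ j, mask.getD j false = true → (roundA boxes mask cs).1.getD j false = true) ∧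
    (roundA boxes mask cs).2.map Prod.fst = cs.map Prod.fst ∧
    (∀ p ∈ (roundA boxes mask cs).2,
        CraneInv p.1 boxes (roundA boxes mask cs).1 p.2 ∧ p.2 ≤ boxes.length) := by
  intro cs
  induction cs with
  | nil => intro mask hl _; simp [roundA, hl]
  | cons p rest ih =>
    obtain ⟨c, k⟩ := p
    intro mask hl hinv
    have hck := hinv (c, k) (by simp)
    have hinner : innerA c boxes mask k = pairF c mask boxes :=
      innerA_eq c boxes mask k hl hck.2 hck.1
    have hl1 : (pairF c mask boxes).1.length = boxes.length := by
      rw [pairF_length]; exact hl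
    have hrest : ∀ p ∈ rest, CraneInv p.1 boxes (pairF c mask boxes).1 p.2 ∧ p.2 ≤ boxes.length := by
      intro q hq
      refine ⟨craneInv_mono _ _ _ _ _ (fun j hj => pairF_mono c mask boxes j hj)
        (hinv q (by simp [hq])).1, (hinv q (by simp [hq])).2⟩
    obtain ⟨ihl, ihsel, ihmono, ihfst, ihinv⟩ := ih (pairF c mask boxes).1 hl1 hrest
    have hsplit : roundA boxes mask ((c, k) :: rest)
        = ((roundA boxes (pairF c mask boxes).1 rest).1,
           (c, (pairF c mask boxes).2) :: (roundA boxes (pairF c mask boxes).1 rest).2) := by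
      simp [roundA, hinner]
    rw [hsplit]
    refine ⟨ihl, ?_, ?_, by simpa using ihfst, ?_⟩
    · simp only [List.map_cons, List.foldl_cons]
      rw [ihsel, sel_pairF c mask boxes hl]
    · intro j hj
      exact ihmono j (pairF_mono c mask boxes j hj)
    · intro q hq
      rcases List.mem_cons.mp hq with hq | hq
      · subst hq
        refine ⟨craneInv_mono _ _ _ _ _ ihmono (pairF_inv c mask boxes), ?_⟩
        exact pairF_le_length c mask boxes hl
      · exact ihinv q hq

theorem outer_bisim (cranes boxes : List Int) :
    ∀ (fuel : Nat) (cs : List (Int × Nat)) (mask : List Bool) (cnt : Int),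
    mask.length = boxes.length → cs.map Prod.fst = cranes →
    (∀ p ∈ cs, CraneInv p.1 boxes mask p.2 ∧ p.2 ≤ boxes.length) →
    outerA boxes fuel cs mask cnt = outerB cranes fuel (sel mask boxes) cnt := by
  intro fuel
  induction fuel with
  | zero => intro cs mask cnt _ _ _; rfl
  | succ fuel ih =>
    intro cs mask cnt hl hfst hinv
    rw [outerA, outerB]
    by_cases hdone : mask.count true = mask.length
    · rw [if_pos hdone, if_pos ((sel_nil_iff mask boxes hl).mpr hdone)]
    · rw [if_neg hdone, if_neg (fun h => hdone ((sel_nil_iff mask boxes hl).mp h))]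
      obtain ⟨hL, hS, _, hF, hI⟩ := roundA_spec boxes cs mask hl hinv
      have := ih (roundA boxes mask cs).2 (roundA boxes mask cs).1 (cnt + 1) hL
        (by rw [hF, hfst]) hI
      rw [this, hS, hfst]
      rfl

theorem sel_replicate (boxes : List Int) :
    sel (List.replicate boxes.length false) boxes = boxes := by
  induction boxes with
  | nil => rfl
  | cons b bs ih => simpa [List.replicate_succ, sel] using ih

-- ===== VERDICT (by name: the statement is the Claim_ definition above) =====
theorem solution_spec : Claim_equal_solution := by
  unfold Claim_equal_solution
  intro cranes boxes _ _
  unfold Spec_solution solution solution_alt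
  cases h1 : PySem.List.pyGet? cranes 0 with
  | none => rfl
  | some c0 =>
    cases h2 : PySem.List.pyGet? boxes 0 with
    | none => rfl
    | some b0 =>
      dsimp only
      by_cases hg : c0 < b0
      · rw [if_pos hg, if_pos hg]
      · rw [if_neg hg, if_neg hg]
        rw [outer_bisim cranes boxes boxes.length (cranes.map (fun c => (c, 0)))
          (List.replicate boxes.length false) 0 (by simp) (by simp [List.map_map, Function.comp_def]) ?_]
        · rw [sel_replicate]
        · intro p hp
          simp only [List.mem_map] at hp
          obtain ⟨c, _, rfl⟩ := hp
          exact ⟨fun j hj => absurd hj (by omega), by omega⟩
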